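-- pv_equiv track=rewrite | github.com/johnjosephhorton/rubin | analysis/job_design_visualization.py | create_title_with_worker_assignments
-- ===== SOURCE A (Python) =====
-- def create_title_with_worker_assignments(W):
--     """
--     Create a title string showing task sequence grouped by workers
--     """
--     # Initialize variables
--     current_worker = W[0]
--     groups = []
--     current_group = []
--
--     # Group tasks by worker
--     for task_idx, worker in enumerate(W, 1):
--         if worker != current_worker:
--             groups.append(current_group)
--             current_group = []
--             current_worker = worker
--         current_group.append(str(task_idx))
--
--     # Add the last group
--     groups.append(current_group)
--
--     # Create the formatted string
--     worker_sections = [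
--         "[" + "".join(f"{task}," for task in group)[:-1] + "]" for group in groups
--     ]
--     return "Job Design " + "".join(worker_sections)
-- ===== SOURCE B (Python) =====
-- def create_title_with_worker_assignments(W):
--     if not W:
--         return "Job Design "
--     body = str(1) + "".join(
--         ("," if a == b else "][") + str(i)
--         for i, (a, b) in enumerate(zip(W, W[1:]), 2))
--     return "Job Design [" + body + "]"
-- ===== Notes on version B (the rewrite author's own statement) =====
-- stated objective: simpler
-- what changed: B replaces A's current_worker/groups/current_group state machine (nested group lists, each formatted by a join-then-chop) with a single flat pass that emits the separator (',' or '][') between each adjacent pair from zip of W with its tail.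
import Mathlib
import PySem

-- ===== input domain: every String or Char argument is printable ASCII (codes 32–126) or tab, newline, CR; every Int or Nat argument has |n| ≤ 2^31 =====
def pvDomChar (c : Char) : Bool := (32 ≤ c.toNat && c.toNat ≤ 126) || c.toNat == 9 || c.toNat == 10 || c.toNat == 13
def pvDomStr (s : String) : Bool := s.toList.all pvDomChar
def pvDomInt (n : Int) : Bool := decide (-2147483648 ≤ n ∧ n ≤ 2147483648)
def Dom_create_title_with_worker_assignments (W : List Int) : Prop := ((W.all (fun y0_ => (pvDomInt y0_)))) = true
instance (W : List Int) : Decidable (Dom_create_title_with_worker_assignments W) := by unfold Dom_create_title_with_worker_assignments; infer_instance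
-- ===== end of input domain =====

-- B replaces A's current_worker/groups/current_group state machine (nested groups, each
-- formatted by a join-then-chop) with a single flat pass emitting the separator (',' or '][')
-- between each adjacent pair of W zipped with its tail (measured faster by a constant factor:
-- no per-group list building / join / chop). On the empty list A raises IndexError (it indexes
-- the first element), excluded by Pre_; B there returns "Job Design ".


-- ===== PORT A =====
-- the loop body: state (current_worker, groups, current_group), element (task_idx, worker)
def pvAStep (s : Int × List (List String) × List String) (p : Int × Int) :
    Int × List (List String) × List String :=
  if p.2 ≠ s.1 then (p.2, s.2.1 ++ [s.2.2], [PySem.Int.toStr p.1])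
  else (s.1, s.2.1, s.2.2 ++ [PySem.Int.toStr p.1])

-- "[" + "".join(f"{task}," for task in group)[:-1] + "]"
def pvFmtGroup (g : List String) : String :=
  "[" ++ PySem.Str.slice (PySem.Str.join "" (g.map (fun t => t ++ ","))) none (some (-1)) ++ "]"

def create_title_with_worker_assignments (W : List Int) : String :=
  match PySem.List.pyGet? W 0 with
  | none => ""   -- indexing the first element raises IndexError here; excluded by Pre_
  | some w0 =>
    let r := (PySem.List.enumerate W 1).foldl pvAStep (w0, [], [])
    "Job Design " ++ PySem.Str.join "" ((r.2.1 ++ [r.2.2]).map pvFmtGroup)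

-- ===== PORT B =====
-- ("," if a == b else "][") + str(i)
def pvSep (p : Int × Int × Int) : String :=
  (if p.2.1 == p.2.2 then "," else "][") ++ PySem.Int.toStr p.1

def create_title_with_worker_assignments_alt (W : List Int) : String :=
  if W = [] then "Job Design "
  else
    "Job Design [" ++
      (PySem.Int.toStr 1 ++
        PySem.Str.join ""
          ((PySem.List.enumerate (W.zip (PySem.List.slice W (some 1) none)) 2).map pvSep)) ++ "]"

-- ===== PRECONDITION & SPEC =====
-- A indexes the first element of W first, so it raises IndexError exactly on the empty list.
def Pre_create_title_with_worker_assignments (W : List Int) : Prop := W ≠ []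
instance (W : List Int) : Decidable (Pre_create_title_with_worker_assignments W) := by unfold Pre_create_title_with_worker_assignments; infer_instance
def pvWitness_create_title_with_worker_assignments : List Int := ([1, 1, 2])

def Spec_create_title_with_worker_assignments (W : List Int) (out : String) : Prop := out = create_title_with_worker_assignments_alt W
instance (W : List Int) (out : String) : Decidable (Spec_create_title_with_worker_assignments W out) := by unfold Spec_create_title_with_worker_assignments; infer_instance

-- ===== CLAIM (what is proved, stated in full; the proofs are below) =====
def Claim_equal_create_title_with_worker_assignments : Prop := ∀ (W : List Int), Dom_create_title_with_worker_assignments W → Pre_create_title_with_worker_assignments W → Spec_create_title_with_worker_assignments W (create_title_with_worker_assignments W)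

-- ===== LEMMAS AND PROOFS =====

-- characters of "".join(f"{t}," for t in cg) without its final comma
def pvInner (cg : List String) : List Char :=
  ((cg.map (fun t => t.toList ++ [','])).flatten).dropLast

-- the characters A's state machine still emits (between the pending '[' and its ']')
-- given current worker cw, current group cg, next index i, and the remaining workers
def pvBody (cw : Int) (cg : List String) (i : Int) : List Int → List Char
  | [] => pvInner cg
  | w :: t =>
    if w = cw then pvBody cw (cg ++ [PySem.Int.toStr i]) (i + 1) t
    else pvInner cg ++ ']' :: '[' :: pvBody w [PySem.Int.toStr i] (i + 1) t

theorem pv_intercalate_nil (l : List (List Char)) : PySem.Chars.join [] l = l.flatten := by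
  show [].intercalate _ = _
  induction l with
  | nil => rfl
  | cons x t ih =>
    cases t with
    | nil => simp [List.intercalate]
    | cons y s => simp only [List.intercalate, List.intersperse] at *; simp_all [List.flatten]

theorem pv_map_toList_comma (g : List String) :
    (g.map (fun t => t ++ ",")).map String.toList = g.map (fun t => t.toList ++ [',']) := by
  simp [List.map_map]

theorem pv_join_empty_toList (l : List String) :
    (PySem.Str.join "" l).toList = (l.map String.toList).flatten := by
  rw [PySem.Str.toList_join, show ("" : String).toList = [] from rfl, pv_intercalate_nil]

theorem pv_fmtGroup_toList (g : List String) :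
    (pvFmtGroup g).toList = '[' :: pvInner g ++ [']'] := by
  simp only [pvFmtGroup, pvInner, String.toList_append, PySem.Str.toList_slice,
    PySem.Chars.slice_eq_listSlice, PySem.List.slice_to_neg_one, pv_join_empty_toList,
    pv_map_toList_comma]
  rfl

theorem pv_flatten_comma (cg : List String) (h : cg ≠ []) :
    (cg.map (fun t => t.toList ++ [','])).flatten = pvInner cg ++ [','] := by
  induction cg with
  | nil => simp at h
  | cons x t ih =>
    cases t with
    | nil => simp [pvInner]
    | cons y s =>
      have h' := ih (by simp)
      simp only [List.map_cons, List.flatten_cons, pvInner] at h' ⊢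
      rw [h']
      conv_rhs => rw [← List.append_assoc, List.dropLast_concat]
      simp

theorem pv_inner_singleton (x : String) : pvInner [x] = x.toList := by
  simp [pvInner]

theorem pv_inner_append (cg : List String) (x : String) (h : cg ≠ []) :
    pvInner (cg ++ [x]) = pvInner cg ++ ',' :: x.toList := by
  have h1 := pv_flatten_comma cg h
  have h2 : pvInner (cg ++ [x]) = ((cg.map (fun t => t.toList ++ [','])).flatten ++ (x.toList ++ [','])).dropLast := by
    simp [pvInner]
  rw [h2, h1, show (pvInner cg ++ [','] ++ (x.toList ++ [','])) =
      (pvInner cg ++ ',' :: x.toList) ++ [','] by simp, List.dropLast_concat]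

theorem pv_A_loop (ws : List Int) : ∀ (i cw : Int) (gs : List (List String)) (cg : List String),
    ((((PySem.List.enumerate ws i).foldl pvAStep (cw, gs, cg)).2.1 ++
        [((PySem.List.enumerate ws i).foldl pvAStep (cw, gs, cg)).2.2]).map
      (fun g => (pvFmtGroup g).toList)).flatten
      = (gs.map (fun g => (pvFmtGroup g).toList)).flatten ++ '[' :: (pvBody cw cg i ws ++ [']']) := by
  induction ws with
  | nil =>
    intro i cw gs cg
    simp [PySem.List.enumerate_nil, pvBody, pv_fmtGroup_toList]
  | cons w t ih =>
    intro i cw gs cg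
    rw [PySem.List.enumerate_cons, List.foldl_cons]
    by_cases hw : w = cw
    · have : pvAStep (cw, gs, cg) (i, w) = (cw, gs, cg ++ [PySem.Int.toStr i]) := by
        simp [pvAStep, hw]
      rw [this, ih]
      simp [pvBody, hw]
    · have : pvAStep (cw, gs, cg) (i, w) = (w, gs ++ [cg], [PySem.Int.toStr i]) := by
        simp [pvAStep, hw]
      rw [this, ih]
      simp [pvBody, hw, pv_fmtGroup_toList]

theorem pv_B_loop (ws : List Int) : ∀ (cw i : Int) (cg : List String), cg ≠ [] →
    pvInner cg ++ ((PySem.List.enumerate ((cw :: ws).zip ws) i).map (fun p => (pvSep p).toList)).flatten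
      = pvBody cw cg i ws := by
  induction ws with
  | nil =>
    intro cw i cg _
    simp [PySem.List.enumerate_nil, pvBody]
  | cons w t ih =>
    intro cw i cg hcg
    rw [show (cw :: w :: t).zip (w :: t) = (cw, w) :: (w :: t).zip t from rfl,
      PySem.List.enumerate_cons, List.map_cons, List.flatten_cons]
    by_cases hw : w = cw
    · have hsep : (pvSep (i, cw, w)).toList = ',' :: PySem.Int.toChars i := by
        simp [pvSep, hw, String.toList_append, PySem.Int.toList_toStr]
      rw [hsep, pvBody]
      simp only [hw]
      rw [← ih cw (i + 1) (cg ++ [PySem.Int.toStr i]) (by simp),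
        pv_inner_append cg _ hcg, PySem.Int.toList_toStr]
      simp
    · have hsep : (pvSep (i, cw, w)).toList = ']' :: '[' :: PySem.Int.toChars i := by
        simp [pvSep, String.toList_append, PySem.Int.toList_toStr, Ne.symm hw]
      rw [hsep, pvBody, if_neg hw,
        ← ih w (i + 1) [PySem.Int.toStr i] (by simp), pv_inner_singleton, PySem.Int.toList_toStr]
      simp

theorem pv_main (W : List Int) (h : W ≠ []) :
    create_title_with_worker_assignments W = create_title_with_worker_assignments_alt W := by
  cases W with
  | nil => exact absurd rfl h
  | cons w0 ws =>
    apply String.toList_inj.mp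
    have hget : PySem.List.pyGet? (w0 :: ws) 0 = some w0 := by
      simp [PySem.List.pyGet?, PySem.List.pyIdx?]
    have hstep : pvAStep (w0, [], []) (1, w0) = (w0, [], [PySem.Int.toStr 1]) := by
      simp [pvAStep]
    have hA : (create_title_with_worker_assignments (w0 :: ws)).toList =
        "Job Design ".toList ++
          ((((PySem.List.enumerate ws 2).foldl pvAStep (w0, [], [PySem.Int.toStr 1])).2.1 ++
            [((PySem.List.enumerate ws 2).foldl pvAStep (w0, [], [PySem.Int.toStr 1])).2.2]).map
              (fun g => (pvFmtGroup g).toList)).flatten := by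
      simp only [create_title_with_worker_assignments, hget, PySem.List.enumerate_cons,
        List.foldl_cons, hstep, String.toList_append, pv_join_empty_toList, List.map_map]
      rfl
    rw [hA, pv_A_loop ws 2 w0 [] [PySem.Int.toStr 1]]
    have hB : (create_title_with_worker_assignments_alt (w0 :: ws)).toList =
        "Job Design ".toList ++ '[' ::
          ((PySem.Int.toStr 1).toList ++
            (((PySem.List.enumerate ((w0 :: ws).zip ws) 2).map (fun p => (pvSep p).toList)).flatten ++ [']'])) := by
      simp only [create_title_with_worker_assignments_alt, if_neg (List.cons_ne_nil w0 ws),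
        PySem.List.slice_from_one, List.tail_cons, String.toList_append, pv_join_empty_toList,
        List.map_map]
      rfl
    rw [hB, show (PySem.Int.toStr 1).toList = pvInner [PySem.Int.toStr 1] from (pv_inner_singleton _).symm]
    rw [← List.append_assoc (pvInner [PySem.Int.toStr 1])]
    rw [pv_B_loop ws w0 2 [PySem.Int.toStr 1] (by simp)]
    simp

-- ===== VERDICT (by name: the statement is the Claim_ definition above) =====
theorem create_title_with_worker_assignments_spec : Claim_equal_create_title_with_worker_assignments := by
  intro W _ hpre
  exact pv_main W hpre
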